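-- pv_equiv track=rewrite | github.com/A-Evan-S/Advent-Of-Code-2020 | Day_04/day4.py | process_passports
-- ===== SOURCE A (Python) =====
-- def process_passports(input):
--     passports = []
--     current_passport = dict()
--     for line in input:
--         if len(line) == 0:
--             current_passport.pop("cid", None)
--             passports.append(current_passport)
--             current_passport = dict()
--         else:
--             fields = line.split()
--             for field in fields:
--                 key, val = field.split(':')
--                 current_passport[key] = val
--     current_passport.pop("cid", None)
--     passports.append(current_passport)
--     return passports
-- ===== SOURCE B (Python) =====
-- def process_passports(input):
--     # Phase 1: group the lines into blank-separated chunks.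
--     chunks = []
--     cur = []
--     for line in input:
--         if line:
--             cur.append(line)
--         else:
--             chunks.append(cur)
--             cur = []
--     chunks.append(cur)
--     # Phase 2: parse each chunk into a passport dict and drop 'cid'.
--     out = []
--     for chunk in chunks:
--         d = dict(field.split(':') for line in chunk for field in line.split())
--         d.pop('cid', None)
--         out.append(d)
--     return out
-- ===== Notes on version B (the rewrite author's own statement) =====
-- stated objective: alternative
-- what changed: A builds each passport dict incrementally inside one combined pass over the lines; B first groups the lines into blank-separated chunks, then in a second pass builds each chunk's dict at once from a flattened field generator and pops 'cid'.
import Mathlib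
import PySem

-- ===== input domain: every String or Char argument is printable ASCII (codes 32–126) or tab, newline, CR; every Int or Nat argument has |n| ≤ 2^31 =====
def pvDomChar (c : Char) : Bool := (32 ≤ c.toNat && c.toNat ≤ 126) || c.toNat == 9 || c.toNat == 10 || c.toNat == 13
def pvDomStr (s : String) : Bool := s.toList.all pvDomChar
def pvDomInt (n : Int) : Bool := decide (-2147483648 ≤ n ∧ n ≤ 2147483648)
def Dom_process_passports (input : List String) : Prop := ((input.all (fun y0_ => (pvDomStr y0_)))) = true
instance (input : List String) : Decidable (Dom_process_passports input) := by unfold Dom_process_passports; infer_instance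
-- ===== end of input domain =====

-- B reorganizes A's single combined pass into two phases (group lines into chunks, then parse each chunk into a dict): alternative decomposition, same cost.


-- ===== PORT A =====
-- one field "key:val" into the current dict (Python raises ValueError when the split is not a pair; excluded by Pre_)
def pvStepFieldA (d : PySem.Dict String String) (field : String) : PySem.Dict String String :=
  match PySem.Str.split? field ":" with
  | some [k, v] => d.insert k v
  | _ => d

def pvStepLineA (st : List (PySem.Dict String String) × PySem.Dict String String) (line : String) :
    List (PySem.Dict String String) × PySem.Dict String String :=
  if PySem.Str.len line == 0 then
    (st.1 ++ [st.2.erase "cid"], PySem.Dict.empty)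
  else
    (st.1, (PySem.Str.split₀ line).foldl pvStepFieldA st.2)

def process_passports (input : List String) : List (List (String × String)) :=
  let st := input.foldl pvStepLineA ([], PySem.Dict.empty)
  (st.1 ++ [st.2.erase "cid"]).map (fun d => d.items)

-- ===== PORT B =====
-- phase 1: group lines into blank-separated chunks
def pvGroupStep (st : List (List String) × List String) (line : String) :
    List (List String) × List String :=
  if line != "" then (st.1, st.2 ++ [line]) else (st.1 ++ [st.2], [])

-- phase 2: dict(field.split(':') for line in chunk for field in line.split()), then .pop('cid', None)
def pvPairStep (d : PySem.Dict String String) (field : String) : PySem.Dict String String :=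
  match PySem.Str.split? field ":" with
  | some [k, v] => d.insert k v
  | _ => d

def pvParseChunk (chunk : List String) : List (String × String) :=
  (((chunk.flatMap (fun line => PySem.Str.split₀ line)).foldl pvPairStep PySem.Dict.empty).erase "cid").items

def process_passports_alt (input : List String) : List (List (String × String)) :=
  let g := input.foldl pvGroupStep ([], [])
  (g.1 ++ [g.2]).map pvParseChunk

-- ===== PRECONDITION & SPEC =====
-- Pre_ excludes exactly the inputs where Python A raises ValueError: a whitespace-separated
-- field of some line that does not split on ':' into exactly two parts (B raises there too).
def Pre_process_passports (input : List String) : Prop :=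
  ∀ line ∈ input, ∀ f ∈ PySem.Str.split₀ line, ((PySem.Str.split? f ":").getD []).length = 2
instance (input : List String) : Decidable (Pre_process_passports input) := by
  unfold Pre_process_passports; infer_instance

def pvWitness_process_passports : List String := ["ecl:gry pid:860", "", "byr:1937 cid:88"]

def Spec_process_passports (input : List String) (out : List (List (String × String))) : Prop := out = process_passports_alt input
instance (input : List String) (out : List (List (String × String))) : Decidable (Spec_process_passports input out) := by unfold Spec_process_passports; infer_instance

-- ===== CLAIM (what is proved, stated in full; the proofs are below) =====
def Claim_equal_process_passports : Prop := ∀ (input : List String), Dom_process_passports input → Pre_process_passports input → Spec_process_passports input (process_passports input)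

-- ===== LEMMAS AND PROOFS =====
-- the dict A has accumulated after reading the lines of a chunk
def pvChunkDict (c : List String) : PySem.Dict String String :=
  (c.flatMap (fun line => PySem.Str.split₀ line)).foldl pvPairStep PySem.Dict.empty

theorem pvStepFieldA_eq : pvStepFieldA = pvPairStep := rfl

theorem pvChunkDict_nil : pvChunkDict [] = PySem.Dict.empty := rfl

theorem pvChunkDict_snoc (c : List String) (l : String) :
    pvChunkDict (c ++ [l]) = (PySem.Str.split₀ l).foldl pvPairStep (pvChunkDict c) := by
  simp [pvChunkDict, List.foldl_append]

theorem pv_inv (lines : List String) (accB : List (List String)) (c : List String) :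
    lines.foldl pvStepLineA (accB.map (fun ch => (pvChunkDict ch).erase "cid"), pvChunkDict c)
      = ((lines.foldl pvGroupStep (accB, c)).1.map (fun ch => (pvChunkDict ch).erase "cid"),
         pvChunkDict (lines.foldl pvGroupStep (accB, c)).2) := by
  induction lines generalizing accB c with
  | nil => rfl
  | cons l ls ih =>
    simp only [List.foldl_cons]
    by_cases h : l = ""
    · have hA : pvStepLineA (accB.map (fun ch => (pvChunkDict ch).erase "cid"), pvChunkDict c) l
          = ((accB ++ [c]).map (fun ch => (pvChunkDict ch).erase "cid"), pvChunkDict []) := by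
        simp [pvStepLineA, h, pvChunkDict_nil]
      have hB : pvGroupStep (accB, c) l = (accB ++ [c], []) := by
        simp [pvGroupStep, h]
      rw [hA, hB, ih]
    · have hA : pvStepLineA (accB.map (fun ch => (pvChunkDict ch).erase "cid"), pvChunkDict c) l
          = (accB.map (fun ch => (pvChunkDict ch).erase "cid"), pvChunkDict (c ++ [l])) := by
        simp [pvStepLineA, h, pvChunkDict_snoc, pvStepFieldA_eq]
      have hB : pvGroupStep (accB, c) l = (accB, c ++ [l]) := by
        simp [pvGroupStep, h]
      rw [hA, hB, ih]

-- ===== VERDICT (by name: the statement is the Claim_ definition above) =====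
theorem process_passports_spec : Claim_equal_process_passports := by
  intro input _ _
  unfold Spec_process_passports process_passports process_passports_alt
  have h := pv_inv input [] []
  simp only [List.map_nil] at h
  rw [show pvChunkDict [] = PySem.Dict.empty from rfl] at h
  rw [h]
  simp [pvParseChunk, pvChunkDict, List.map_append]
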